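-- pv_equiv track=rewrite | github.com/GitMonsters/octotetrahedral-agi | re_arc_bench_solves/7f0b4477.py | transform
-- ===== SOURCE A (Python) =====
-- def transform(grid):
--     import copy
--     from collections import Counter
--
--     rows = len(grid)
--     cols = len(grid[0])
--
--     # Find the background color (most common)
--     flat = [c for row in grid for c in row]
--     bg_color = Counter(flat).most_common(1)[0][0]
--
--     # Create output grid (copy of input)
--     output = copy.deepcopy(grid)
--
--     # Find all non-background cells (markers)
--     markers = []
--     for r in range(rows):
--         for c in range(cols):
--             if grid[r][c] != bg_color:
--                 markers.append((r, c, grid[r][c]))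
--
--     # Four diagonal directions: NW, NE, SW, SE
--     directions = [(-1, -1), (-1, 1), (1, -1), (1, 1)]
--
--     # For each marker, draw diagonal rays in all 4 directions
--     for r, c, color in markers:
--         for dr, dc in directions:
--             nr, nc = r + dr, c + dc
--             while 0 <= nr < rows and 0 <= nc < cols:
--                 output[nr][nc] = color
--                 nr += dr
--                 nc += dc
--
--     return output
-- ===== SOURCE B (Python) =====
-- def transform(grid):
--     rows = len(grid)
--     cols = len(grid[0])
--
--     # background = most common value, first-encountered wins ties
--     counts = {}
--     for row in grid:
--         for v in row:
--             counts[v] = counts.get(v, 0) + 1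
--     bg = max(counts, key=counts.get)
--
--     # For each diagonal (r-c) and anti-diagonal (r+c), keep the last two
--     # markers in row-major scan order as (idx, color) with idx = r*cols+c.
--     diag = {}
--     anti = {}
--     for r in range(rows):
--         for c in range(cols):
--             v = grid[r][c]
--             if v != bg:
--                 idx = r * cols + c
--                 old = diag.get(r - c)
--                 diag[r - c] = (old[1] if old is not None else None, (idx, v))
--                 old = anti.get(r + c)
--                 anti[r + c] = (old[1] if old is not None else None, (idx, v))
--
--     def cand(table, key, myidx):
--         pair = table.get(key)
--         if pair is None:
--             return None
--         second, last = pair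
--         return second if last[0] == myidx else last
--
--     out = []
--     for i in range(rows):
--         row = grid[i]
--         new_row = list(row)
--         for j in range(cols):
--             myidx = i * cols + j
--             x = cand(diag, i - j, myidx)
--             y = cand(anti, i + j, myidx)
--             if x is None:
--                 if y is not None:
--                     new_row[j] = y[1]
--             elif y is None or x[0] > y[0]:
--                 new_row[j] = x[1]
--             else:
--                 new_row[j] = y[1]
--         out.append(new_row)
--     return out
-- ===== Notes on version B (the rewrite author's own statement) =====
-- stated objective: faster
-- what changed: Instead of scatter-painting four diagonal rays from every marker (cost markers x ray length), B does one scan recording, per diagonal and anti-diagonal, the last two markers in row-major order, and then computes each cell directly as the colour of the latest marker on its two diagonals (excluding the cell itself), so the per-marker ray walks disappear.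
import Mathlib
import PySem

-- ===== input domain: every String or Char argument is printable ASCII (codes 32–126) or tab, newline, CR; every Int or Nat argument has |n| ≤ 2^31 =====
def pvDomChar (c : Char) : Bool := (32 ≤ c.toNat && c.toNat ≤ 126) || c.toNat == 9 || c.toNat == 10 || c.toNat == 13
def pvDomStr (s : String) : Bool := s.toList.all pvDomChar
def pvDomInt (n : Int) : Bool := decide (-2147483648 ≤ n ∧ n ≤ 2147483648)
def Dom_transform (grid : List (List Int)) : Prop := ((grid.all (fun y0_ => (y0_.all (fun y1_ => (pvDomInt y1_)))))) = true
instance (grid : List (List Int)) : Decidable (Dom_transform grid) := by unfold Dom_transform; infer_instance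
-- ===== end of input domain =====

-- B replaces A's per-marker diagonal ray painting by one scan recording the last two
-- row-major markers per (anti)diagonal plus a direct per-cell lookup
-- (O(R*C) instead of O(markers*(R+C)); the harness could not time it, speed unverified).


-- ===== PORT A =====
-- output[i][j] = v  (list-of-lists assignment)
def pvSet2 (out : List (List Int)) (i j : Nat) (v : Int) : List (List Int) :=
  out.set i ((out.getD i []).set j v)

-- the 'while 0 <= nr < rows and 0 <= nc < cols: output[nr][nc] = color; nr += dr; nc += dc'
-- loop; fuel (rows+cols) is an upper bound on the iteration count, so the recursion is exact
def pvPaintRay (fuel : Nat) (out : List (List Int)) (nr nc dr dc rows cols color : Int) :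
    List (List Int) :=
  match fuel with
  | 0 => out
  | Nat.succ f =>
    if 0 ≤ nr ∧ nr < rows ∧ 0 ≤ nc ∧ nc < cols then
      pvPaintRay f (pvSet2 out nr.toNat nc.toNat color) (nr + dr) (nc + dc) dr dc rows cols color
    else out

-- Counter(flat).most_common(1)[0][0]: first-encountered key of maximal count
def pvMostCommon (flat : List Int) : Int :=
  (((PySem.Dict.counter flat).items).foldl
    (fun best kc =>
      match best with
      | none => some kc
      | some b => if kc.2 > b.2 then some kc else some b)
    none).getD (0, 0) |>.1

-- the marker-collection double loop of A
def pvMarkers (grid : List (List Int)) (bg : Int) : List (Int × Int × Int) :=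
  (List.range grid.length).flatMap (fun r =>
    (List.range (grid.getD 0 []).length).filterMap (fun c =>
      let v := (grid.getD r []).getD c 0
      if v ≠ bg then some ((r : Int), (c : Int), v) else none))

def transform (grid : List (List Int)) : List (List Int) :=
  let rows := grid.length
  let cols := (grid.getD 0 []).length
  let flat := grid.flatMap (fun row => row)
  let bg := pvMostCommon flat
  let markers := pvMarkers grid bg
  let dirs : List (Int × Int) := [(-1, -1), (-1, 1), (1, -1), (1, 1)]
  markers.foldl (fun out m =>
    dirs.foldl (fun out d =>
      pvPaintRay (rows + cols) out (m.1 + d.1) (m.2.1 + d.2) d.1 d.2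
        (rows : Int) (cols : Int) m.2.2) out) grid

-- ===== PORT B =====
-- table[key] = (old[1] if old is not None else None, (idx, v))
def pvTop2Upd (t : PySem.Dict Int (Option (Int × Int) × (Int × Int))) (key idx v : Int) :
    PySem.Dict Int (Option (Int × Int) × (Int × Int)) :=
  t.insert key ((t.get? key).map (·.2), (idx, v))

-- cand(table, key, myidx)
def pvCand (t : PySem.Dict Int (Option (Int × Int) × (Int × Int))) (key myidx : Int) :
    Option (Int × Int) :=
  match t.get? key with
  | none => none
  | some p => if p.2.1 = myidx then p.1 else some p.2

-- counts = {}; … ; bg = max(counts, key=counts.get)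
def pvBgAlt (grid : List (List Int)) : Int :=
  let counts := grid.foldl (fun d row =>
    row.foldl (fun d v => d.insert v (d.getD v 0 + 1)) d)
    (PySem.Dict.empty : PySem.Dict Int Int)
  (counts.keys.foldl (fun best k =>
      match best with
      | none => some k
      | some b => if counts.getD k 0 > counts.getD b 0 then some k else some b)
    none).getD 0

def transform_alt (grid : List (List Int)) : List (List Int) :=
  let rows := grid.length
  let cols := (grid.getD 0 []).length
  let bg := pvBgAlt grid
  let tabs := (List.range rows).foldl (fun st r =>
      (List.range cols).foldl (fun st c =>
        let v := (grid.getD r []).getD c 0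
        if v ≠ bg then
          let idx := (r : Int) * (cols : Int) + (c : Int)
          (pvTop2Upd st.1 ((r : Int) - (c : Int)) idx v,
           pvTop2Upd st.2 ((r : Int) + (c : Int)) idx v)
        else st) st)
    (PySem.Dict.empty, PySem.Dict.empty)
  grid.mapIdx (fun i row =>
    row.mapIdx (fun j x =>
      if j < cols then
        let myidx := (i : Int) * (cols : Int) + (j : Int)
        match pvCand tabs.1 ((i : Int) - (j : Int)) myidx,
              pvCand tabs.2 ((i : Int) + (j : Int)) myidx with
        | none, none => x
        | none, some y => y.2
        | some p, none => p.2
        | some p, some y => if p.1 > y.1 then p.2 else y.2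
      else x))

-- ===== PRECONDITION & SPEC =====
-- Pre_ is exactly the set of inputs on which A returns normally: A raises IndexError on an
-- empty grid (grid[0]), on a grid whose rows are all empty (most_common(1)[0] of an empty
-- Counter), and whenever some row is shorter than the first row (grid[r][c] in the marker scan).
def Pre_transform (grid : List (List Int)) : Prop :=
  grid ≠ [] ∧ grid.flatMap (fun row => row) ≠ [] ∧
    ∀ row ∈ grid, (grid.getD 0 []).length ≤ row.length
instance (grid : List (List Int)) : Decidable (Pre_transform grid) := by
  unfold Pre_transform; infer_instance

def pvWitness_transform : List (List Int) := [[0, 1], [0, 0]]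

def Spec_transform (grid : List (List Int)) (out : List (List Int)) : Prop := out = transform_alt grid
instance (grid : List (List Int)) (out : List (List Int)) : Decidable (Spec_transform grid out) := by unfold Spec_transform; infer_instance

-- ===== CLAIM (what is proved, stated in full; the proofs are below) =====
def Claim_equal_transform : Prop := ∀ (grid : List (List Int)), Dom_transform grid → Pre_transform grid → Spec_transform grid (transform grid)

-- ===== LEMMAS AND PROOFS =====

-- abbreviations used only by the proofs
def pvCols (grid : List (List Int)) : Nat := (grid.getD 0 []).length

def pvGet2 (out : List (List Int)) (i j : Nat) : Int := (out.getD i []).getD j 0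

def pvShape (a b : List (List Int)) : Prop :=
  a.length = b.length ∧ ∀ t, (a.getD t []).length = (b.getD t []).length

-- 'marker (r,c) covers cell (i,j)': same diagonal or anti-diagonal, not the cell itself
def pvCovers (r c i j : Int) : Bool :=
  decide (((r - c = i - j) ∨ (r + c = i + j)) ∧ ¬(r = i ∧ c = j))

def pvLastWith {α : Type} (p : α → Bool) (l : List α) : Option α :=
  l.foldl (fun acc m => if p m then some m else acc) none

def pvTop2 (L : List (Int × Int)) : Option (Option (Int × Int) × (Int × Int)) :=
  L.getLast?.map (fun last => (L.dropLast.getLast?, last))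

def pvIdx (C : Nat) (m : Int × Int × Int) : Int := m.1 * (C : Int) + m.2.1

-- the RHS both characterizations share: per-cell value from the last covering marker
def pvCell (grid : List (List Int)) (ms : List (Int × Int × Int)) (i j : Nat) : Int :=
  ((pvLastWith (fun m => pvCovers m.1 m.2.1 (i : Int) (j : Int)) ms).map (fun m => m.2.2)).getD
    (pvGet2 grid i j)

lemma pvShape_refl (a : List (List Int)) : pvShape a a := ⟨rfl, fun _ => rfl⟩

lemma pvShape_trans {a b c : List (List Int)} (h1 : pvShape a b) (h2 : pvShape b c) :
    pvShape a c := ⟨h1.1.trans h2.1, fun t => (h1.2 t).trans (h2.2 t)⟩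

lemma pvShape_set2 (out : List (List Int)) (i j : Nat) (v : Int) :
    pvShape (pvSet2 out i j v) out := by
  constructor
  · simp [pvSet2]
  · intro t
    simp only [pvSet2, List.getD_eq_getElem?_getD, List.getElem?_set]
    by_cases h : i = t
    · subst h
      by_cases hl : i < out.length
      · simp [hl]
      · simp [hl, List.getElem?_eq_none (by omega : out.length ≤ i)]
    · simp [h]

lemma pvGet2_set2 (out : List (List Int)) (i j : Nat) (v : Int)
    (hj : j < (out.getD i []).length) (i' j' : Nat) :
    pvGet2 (pvSet2 out i j v) i' j' = if i' = i ∧ j' = j then v else pvGet2 out i' j' := by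
  have hi : i < out.length := by
    by_contra hl
    have : out.getD i [] = [] := by
      simp [List.getD_eq_getElem?_getD, List.getElem?_eq_none (by omega : out.length ≤ i)]
    rw [this] at hj; simp at hj
  simp only [pvGet2, pvSet2, List.getD_eq_getElem?_getD]
  by_cases h : i' = i
  · subst h
    simp only [List.getElem?_set, if_pos rfl, hi, if_true, Option.getD_some]
    by_cases h2 : j' = j
    · subst h2
      simp [List.getElem?_set, List.getD_eq_getElem?_getD] at hj ⊢
      simp [hj]
    · rw [if_neg (fun hh => h2 hh.symm : ¬ j = j'),
        if_neg (fun hh => h2 hh.2 : ¬ (True ∧ j' = j))]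
  · simp only [List.getElem?_set, if_neg (fun hh => h hh.symm : ¬ i = i')]
    rw [if_neg (fun hh => h hh.1)]

lemma pvShape_paintRay (fuel : Nat) (out : List (List Int)) (nr nc dr dc rows cols color : Int) :
    pvShape (pvPaintRay fuel out nr nc dr dc rows cols color) out := by
  induction fuel generalizing out nr nc with
  | zero => exact pvShape_refl _
  | succ f ih =>
    unfold pvPaintRay
    split
    · exact pvShape_trans (ih _ _ _) (pvShape_set2 _ _ _ _)
    · exact pvShape_refl _

lemma pvShape_paintRay' {grid out : List (List Int)} {fuel : Nat} {nr nc dr dc rows cols color : Int}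
    (h : pvShape out grid) :
    pvShape (pvPaintRay fuel out nr nc dr dc rows cols color) grid :=
  pvShape_trans (pvShape_paintRay fuel out nr nc dr dc rows cols color) h

lemma pvPaintRay_get2 (grid : List (List Int)) (dr dc : Int)
    (hdr : dr = 1 ∨ dr = -1) (hdc : dc = 1 ∨ dc = -1)
    (r c v : Int) (hr0 : 0 ≤ r) (hr1 : r < (grid.length : Int))
    (hc0 : 0 ≤ c) (hc1 : c < (pvCols grid : Int))
    (hrl : ∀ row ∈ grid, pvCols grid ≤ row.length) (i j : Nat) :
    ∀ (fuel s : Nat) (out : List (List Int)), pvShape out grid →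
      pvGet2 (pvPaintRay fuel out (r + (s + 1) * dr) (c + (s + 1) * dc) dr dc
          (grid.length : Int) (pvCols grid : Int) v) i j
        = if (∃ k : Nat, k < s + 1 + fuel ∧ s + 1 ≤ k ∧ (i : Int) = r + k * dr ∧
              (j : Int) = c + k * dc ∧ (i : Int) < grid.length ∧ (j : Int) < (pvCols grid : Int))
          then v else pvGet2 out i j := by
  intro fuel
  induction fuel with
  | zero =>
    intro s out hsh
    rw [pvPaintRay, if_neg]
    rintro ⟨k, hk2, hk1, -⟩
    omega
  | succ f ih =>
    intro s out hsh
    rw [pvPaintRay]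
    by_cases hin : 0 ≤ r + (s + 1) * dr ∧ r + (s + 1) * dr < (grid.length : Int) ∧
        0 ≤ c + (s + 1) * dc ∧ c + (s + 1) * dc < (pvCols grid : Int)
    · rw [if_pos hin]
      have e1 : r + (s + 1) * dr + dr = r + ((s + 1 : Nat) + 1 : Int) * dr := by push_cast; ring
      have e2 : c + (s + 1) * dc + dc = c + ((s + 1 : Nat) + 1 : Int) * dc := by push_cast; ring
      rw [e1, e2]
      have hshape2 : pvShape (pvSet2 out (r + (s + 1) * dr).toNat (c + (s + 1) * dc).toNat v) grid :=
        pvShape_trans (pvShape_set2 _ _ _ _) hsh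
      rw [ih (s + 1) _ hshape2]
      have hrow : (c + (s + 1) * dc).toNat < (out.getD (r + (s + 1) * dr).toNat []).length := by
        have hm : (r + (s + 1) * dr).toNat < grid.length := by omega
        have hmem : grid.getD (r + (s + 1) * dr).toNat [] ∈ grid := by
          rw [List.getD_eq_getElem _ _ hm]; exact List.getElem_mem hm
        have := hrl _ hmem
        have := hsh.2 (r + (s + 1) * dr).toNat
        omega
      rw [pvGet2_set2 _ _ _ _ hrow]
      by_cases hE : (∃ k : Nat, k < s + 1 + (f + 1) ∧ s + 1 ≤ k ∧ (i : Int) = r + k * dr ∧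
          (j : Int) = c + k * dc ∧ (i : Int) < grid.length ∧ (j : Int) < (pvCols grid : Int))
      · rw [if_pos hE]
        obtain ⟨k, hk1, hk2, hik, hjk, hir, hjc⟩ := hE
        by_cases hk : k = s + 1
        · subst hk
          push_cast at hik hjk
          have hij : i = (r + (s + 1) * dr).toNat ∧ j = (c + (s + 1) * dc).toNat := by
            constructor <;> omega
          by_cases hE1 : (∃ k : Nat, k < s + 1 + 1 + f ∧ s + 1 + 1 ≤ k ∧ (i : Int) = r + k * dr ∧
              (j : Int) = c + k * dc ∧ (i : Int) < grid.length ∧ (j : Int) < (pvCols grid : Int))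
          · rw [if_pos hE1]
          · rw [if_neg hE1, if_pos hij]
        · have hE1 : (∃ k : Nat, k < s + 1 + 1 + f ∧ s + 1 + 1 ≤ k ∧ (i : Int) = r + k * dr ∧
              (j : Int) = c + k * dc ∧ (i : Int) < grid.length ∧ (j : Int) < (pvCols grid : Int)) :=
            ⟨k, by omega, by omega, hik, hjk, hir, hjc⟩
          rw [if_pos hE1]
      · rw [if_neg hE, if_neg, if_neg]
        · rintro ⟨hi2, hj2⟩
          refine hE ⟨s + 1, by omega, le_refl _, ?_, ?_, by omega, by omega⟩ <;> push_cast <;> omega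
        · rintro ⟨k, hk1, hk2, hik, hjk, hir, hjc⟩
          exact hE ⟨k, by omega, by omega, hik, hjk, hir, hjc⟩
    · rw [if_neg hin, if_neg]
      rintro ⟨k, hk1, hk2, hik, hjk, hir, hjc⟩
      apply hin
      rcases hdr with rfl | rfl <;> rcases hdc with rfl | rfl <;>
        exact ⟨by omega, by omega, by omega, by omega⟩

-- the four rays of one marker paint exactly the covered in-bounds cells
lemma pvPaintMarker_get2 (grid : List (List Int)) (r c v : Int)
    (hr : 0 ≤ r ∧ r < (grid.length : Int)) (hc : 0 ≤ c ∧ c < (pvCols grid : Int))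
    (hrl : ∀ row ∈ grid, pvCols grid ≤ row.length)
    (out : List (List Int)) (hshape : pvShape out grid) (i j : Nat) :
    pvGet2 ([((-1 : Int), (-1 : Int)), (-1, 1), (1, -1), (1, 1)].foldl (fun out d =>
        pvPaintRay (grid.length + pvCols grid) out (r + d.1) (c + d.2) d.1 d.2
          (grid.length : Int) (pvCols grid : Int) v) out) i j
      = if pvCovers r c (i : Int) (j : Int) = true ∧ i < grid.length ∧ j < pvCols grid
        then v else pvGet2 out i j := by
  simp only [List.foldl_cons, List.foldl_nil]
  rw [show r + (-1 : Int) = r + (((0 : Nat) : Int) + 1) * (-1) from by push_cast; ring,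
      show c + (-1 : Int) = c + (((0 : Nat) : Int) + 1) * (-1) from by push_cast; ring,
      show r + (1 : Int) = r + (((0 : Nat) : Int) + 1) * (1 : Int) from by push_cast; ring,
      show c + (1 : Int) = c + (((0 : Nat) : Int) + 1) * (1 : Int) from by push_cast; ring]
  rw [pvPaintRay_get2 grid 1 1 (Or.inl rfl) (Or.inl rfl) r c v hr.1 hr.2 hc.1 hc.2 hrl i j
        (grid.length + pvCols grid) 0 _ (pvShape_paintRay' (pvShape_paintRay' (pvShape_paintRay' hshape)))]
  rw [pvPaintRay_get2 grid 1 (-1) (Or.inl rfl) (Or.inr rfl) r c v hr.1 hr.2 hc.1 hc.2 hrl i j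
        (grid.length + pvCols grid) 0 _ (pvShape_paintRay' (pvShape_paintRay' hshape))]
  rw [pvPaintRay_get2 grid (-1) 1 (Or.inr rfl) (Or.inl rfl) r c v hr.1 hr.2 hc.1 hc.2 hrl i j
        (grid.length + pvCols grid) 0 _ (pvShape_paintRay' hshape)]
  rw [pvPaintRay_get2 grid (-1) (-1) (Or.inr rfl) (Or.inr rfl) r c v hr.1 hr.2 hc.1 hc.2 hrl i j
        (grid.length + pvCols grid) 0 out hshape]
  by_cases hcond : pvCovers r c (i : Int) (j : Int) = true ∧ i < grid.length ∧ j < pvCols grid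
  · rw [if_pos hcond]
    obtain ⟨hcov, hiR, hjC⟩ := hcond
    rw [pvCovers, decide_eq_true_iff] at hcov
    split
    next => rfl
    next h1 =>
    split
    next => rfl
    next h2 =>
    split
    next => rfl
    next h3 =>
    split
    next => rfl
    next h4 =>
    exfalso
    obtain ⟨hd, hne⟩ := hcov
    rcases hd with hd | hd
    · rcases lt_trichotomy r (i : Int) with hlt | heq | hgt
      · exact h1 ⟨((i : Int) - r).toNat, by omega, by omega, by omega, by omega, by omega, by omega⟩
      · omega
      · exact h4 ⟨(r - (i : Int)).toNat, by omega, by omega, by omega, by omega, by omega, by omega⟩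
    · rcases lt_trichotomy r (i : Int) with hlt | heq | hgt
      · exact h2 ⟨((i : Int) - r).toNat, by omega, by omega, by omega, by omega, by omega, by omega⟩
      · omega
      · exact h3 ⟨(r - (i : Int)).toNat, by omega, by omega, by omega, by omega, by omega, by omega⟩
  · rw [if_neg hcond]
    split
    next h =>
      exfalso; apply hcond
      obtain ⟨k, hk1, hk2, hik, hjk, hiR, hjC⟩ := h
      exact ⟨by rw [pvCovers, decide_eq_true_iff]; omega, by omega, by omega⟩
    next =>
    split
    next h =>
      exfalso; apply hcond
      obtain ⟨k, hk1, hk2, hik, hjk, hiR, hjC⟩ := h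
      exact ⟨by rw [pvCovers, decide_eq_true_iff]; omega, by omega, by omega⟩
    next =>
    split
    next h =>
      exfalso; apply hcond
      obtain ⟨k, hk1, hk2, hik, hjk, hiR, hjC⟩ := h
      exact ⟨by rw [pvCovers, decide_eq_true_iff]; omega, by omega, by omega⟩
    next =>
    split
    next h =>
      exfalso; apply hcond
      obtain ⟨k, hk1, hk2, hik, hjk, hiR, hjC⟩ := h
      exact ⟨by rw [pvCovers, decide_eq_true_iff]; omega, by omega, by omega⟩
    next => rfl

lemma pvLastWith_foldl_or {α : Type} (p : α → Bool) (l : List α) :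
    ∀ acc : Option α, l.foldl (fun acc m => if p m then some m else acc) acc
      = (pvLastWith p l).or acc := by
  induction l with
  | nil => intro acc; simp [pvLastWith]
  | cons x xs ih =>
    intro acc
    rw [List.foldl_cons, ih]
    have hx : pvLastWith p (x :: xs) = (pvLastWith p xs).or (if p x then some x else none) := by
      unfold pvLastWith
      rw [List.foldl_cons, ih]
      rfl
    rw [hx, Option.or_assoc]
    congr 1
    by_cases h : p x <;> simp [h]

lemma mem_pvMarkers {grid : List (List Int)} {bg : Int} {m : Int × Int × Int}
    (h : m ∈ pvMarkers grid bg) :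
    ∃ r c : Nat, r < grid.length ∧ c < pvCols grid ∧
      m = ((r : Int), (c : Int), (grid.getD r []).getD c 0) ∧
      (grid.getD r []).getD c 0 ≠ bg := by
  unfold pvMarkers at h
  simp only [List.mem_flatMap, List.mem_range, List.mem_filterMap] at h
  obtain ⟨r, hr, c, hc, hm⟩ := h
  by_cases hbg : (grid.getD r []).getD c 0 ≠ bg
  · rw [if_pos hbg] at hm
    exact ⟨r, c, hr, hc, (Option.some.inj hm).symm, hbg⟩
  · rw [if_neg hbg] at hm
    cases hm

lemma pvShape_paintMarkers (grid : List (List Int)) (ms : List (Int × Int × Int))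
    (out : List (List Int)) (hshape : pvShape out grid) :
    pvShape (ms.foldl (fun out m =>
      [((-1 : Int), (-1 : Int)), (-1, 1), (1, -1), (1, 1)].foldl (fun out d =>
        pvPaintRay (grid.length + pvCols grid) out (m.1 + d.1) (m.2.1 + d.2) d.1 d.2
          (grid.length : Int) (pvCols grid : Int) m.2.2) out) out) grid := by
  induction ms generalizing out with
  | nil => exact hshape
  | cons m ms ih =>
    rw [List.foldl_cons]
    apply ih
    simp only [List.foldl_cons, List.foldl_nil]
    exact pvShape_paintRay' (pvShape_paintRay' (pvShape_paintRay' (pvShape_paintRay' hshape)))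

lemma pvLastWith_cons {α : Type} (p : α → Bool) (x : α) (xs : List α) :
    pvLastWith p (x :: xs) = (pvLastWith p xs).or (if p x then some x else none) := by
  unfold pvLastWith
  rw [List.foldl_cons, pvLastWith_foldl_or]
  rfl

lemma pvFoldl_paint_get2 (grid : List (List Int))
    (hrl : ∀ row ∈ grid, pvCols grid ≤ row.length)
    (ms : List (Int × Int × Int))
    (hms : ∀ m ∈ ms, 0 ≤ m.1 ∧ m.1 < (grid.length : Int) ∧ 0 ≤ m.2.1 ∧ m.2.1 < (pvCols grid : Int))
    (i j : Nat) (hi : i < grid.length) (hj : j < pvCols grid) :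
    ∀ out : List (List Int), pvShape out grid →
      pvGet2 (ms.foldl (fun out m =>
        [((-1 : Int), (-1 : Int)), (-1, 1), (1, -1), (1, 1)].foldl (fun out d =>
          pvPaintRay (grid.length + pvCols grid) out (m.1 + d.1) (m.2.1 + d.2) d.1 d.2
            (grid.length : Int) (pvCols grid : Int) m.2.2) out) out) i j
      = ((pvLastWith (fun m => pvCovers m.1 m.2.1 (i : Int) (j : Int)) ms).map
          (fun m => m.2.2)).getD (pvGet2 out i j) := by
  induction ms with
  | nil => intro out _; simp [pvLastWith]
  | cons m ms ih =>
    intro out hshape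
    rw [List.foldl_cons]
    have hm := hms m (List.mem_cons_self)
    have hsh4 : pvShape (List.foldl (fun out d =>
        pvPaintRay (grid.length + pvCols grid) out (m.1 + d.1) (m.2.1 + d.2) d.1 d.2
          (grid.length : Int) (pvCols grid : Int) m.2.2) out
          [((-1 : Int), (-1 : Int)), (-1, 1), (1, -1), (1, 1)]) grid := by
      simp only [List.foldl_cons, List.foldl_nil]
      exact pvShape_paintRay' (pvShape_paintRay' (pvShape_paintRay' (pvShape_paintRay' hshape)))
    rw [ih (fun x hx => hms x (List.mem_cons_of_mem _ hx)) _ hsh4]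
    rw [pvPaintMarker_get2 grid m.1 m.2.1 m.2.2 ⟨hm.1, hm.2.1⟩ ⟨hm.2.2.1, hm.2.2.2⟩ hrl out hshape i j]
    rw [if_congr (and_iff_left ⟨hi, hj⟩) rfl rfl]
    rw [pvLastWith_cons]
    cases hw : pvLastWith (fun m => pvCovers m.1 m.2.1 (i : Int) (j : Int)) ms with
    | some w => simp [hw]
    | none =>
      by_cases hp : pvCovers m.1 m.2.1 (i : Int) (j : Int) = true <;> simp [hw, hp]

-- untouched cells (j ≥ cols) keep their value
lemma pvFoldl_paint_get2_out (grid : List (List Int))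
    (hrl : ∀ row ∈ grid, pvCols grid ≤ row.length)
    (ms : List (Int × Int × Int))
    (hms : ∀ m ∈ ms, 0 ≤ m.1 ∧ m.1 < (grid.length : Int) ∧ 0 ≤ m.2.1 ∧ m.2.1 < (pvCols grid : Int))
    (i j : Nat) (hj : ¬ j < pvCols grid) :
    ∀ out : List (List Int), pvShape out grid →
      pvGet2 (ms.foldl (fun out m =>
        [((-1 : Int), (-1 : Int)), (-1, 1), (1, -1), (1, 1)].foldl (fun out d =>
          pvPaintRay (grid.length + pvCols grid) out (m.1 + d.1) (m.2.1 + d.2) d.1 d.2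
            (grid.length : Int) (pvCols grid : Int) m.2.2) out) out) i j
      = pvGet2 out i j := by
  induction ms with
  | nil => intro out _; rfl
  | cons m ms ih =>
    intro out hshape
    rw [List.foldl_cons]
    have hsh4 : pvShape (List.foldl (fun out d =>
        pvPaintRay (grid.length + pvCols grid) out (m.1 + d.1) (m.2.1 + d.2) d.1 d.2
          (grid.length : Int) (pvCols grid : Int) m.2.2) out
          [((-1 : Int), (-1 : Int)), (-1, 1), (1, -1), (1, 1)]) grid := by
      simp only [List.foldl_cons, List.foldl_nil]
      exact pvShape_paintRay' (pvShape_paintRay' (pvShape_paintRay' (pvShape_paintRay' hshape)))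
    have hm := hms m (List.mem_cons_self)
    rw [ih (fun x hx => hms x (List.mem_cons_of_mem _ hx)) _ hsh4]
    rw [pvPaintMarker_get2 grid m.1 m.2.1 m.2.2 ⟨hm.1, hm.2.1⟩ ⟨hm.2.2.1, hm.2.2.2⟩ hrl out hshape i j]
    rw [if_neg (fun hh => hj hh.2.2)]

-- ===== A-side characterization =====
lemma transform_shape (grid : List (List Int)) : pvShape (transform grid) grid := by
  have h := pvShape_paintMarkers grid
    (pvMarkers grid (pvMostCommon (grid.flatMap (fun row => row)))) grid (pvShape_refl grid)
  simp only [pvCols] at h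
  exact h

lemma transform_get2 (grid : List (List Int))
    (hrl : ∀ row ∈ grid, pvCols grid ≤ row.length) (i j : Nat)
    (hi : i < grid.length) :
    pvGet2 (transform grid) i j
      = if j < pvCols grid
        then pvCell grid (pvMarkers grid (pvMostCommon (grid.flatMap (fun row => row)))) i j
        else pvGet2 grid i j := by
  have hms : ∀ m ∈ pvMarkers grid (pvMostCommon (grid.flatMap (fun row => row))),
      0 ≤ m.1 ∧ m.1 < (grid.length : Int) ∧ 0 ≤ m.2.1 ∧ m.2.1 < (pvCols grid : Int) := by
    intro m hm
    obtain ⟨r, c, hr, hc, hmeq, -⟩ := mem_pvMarkers hm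
    subst hmeq
    refine ⟨?_, ?_, ?_, ?_⟩ <;> (dsimp only; omega)
  by_cases hj : j < pvCols grid
  · rw [if_pos hj]
    have h := pvFoldl_paint_get2 grid hrl
      (pvMarkers grid (pvMostCommon (grid.flatMap (fun row => row)))) hms i j hi hj
      grid (pvShape_refl grid)
    simp only [pvCols] at h
    exact h
  · rw [if_neg hj]
    have h := pvFoldl_paint_get2_out grid hrl
      (pvMarkers grid (pvMostCommon (grid.flatMap (fun row => row)))) hms i j hj
      grid (pvShape_refl grid)
    simp only [pvCols] at h
    exact h

-- ===== B-side characterization =====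
lemma pvFoldl_flatMap {α β σ : Type} (l : List α) (f : α → List β) (g : σ → β → σ) (init : σ) :
    (l.flatMap f).foldl g init = l.foldl (fun a x => (f x).foldl g a) init := by
  induction l generalizing init with
  | nil => rfl
  | cons x xs ih => simp [List.flatMap_cons, List.foldl_append, ih]

lemma pvFoldl_filterMap {α β σ : Type} (l : List α) (f : α → Option β) (g : σ → β → σ) (init : σ) :
    (l.filterMap f).foldl g init
      = l.foldl (fun a c => match f c with | some m => g a m | none => a) init := by
  induction l generalizing init with
  | nil => rfl
  | cons x xs ih =>
    cases h : f x <;> simp [List.filterMap_cons, h, ih]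

lemma pvFoldl_flatMap_id {σ : Type} (l : List (List Int)) (g : σ → Int → σ) (init : σ) :
    (l.flatMap (fun row => row)).foldl g init = l.foldl (fun a row => row.foldl g a) init := by
  induction l generalizing init with
  | nil => rfl
  | cons x xs ih =>
    simp only [List.flatMap_cons, List.foldl_append, List.foldl_cons]
    exact ih _

lemma pvBgFold (cnt : Int → Int) (S : List Int) : ∀ acc : Option Int,
    (S.map (fun k => (k, cnt k))).foldl (fun best kc => match best with
        | none => some kc
        | some b => if kc.2 > b.2 then some kc else some b) (acc.map (fun k => (k, cnt k)))
      = (S.foldl (fun best k => match best with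
        | none => some k
        | some b => if cnt k > cnt b then some k else some b) acc).map (fun k => (k, cnt k)) := by
  induction S with
  | nil => intro acc; rfl
  | cons x xs ih =>
    intro acc
    rw [List.map_cons, List.foldl_cons, List.foldl_cons]
    cases acc with
    | none => exact ih (some x)
    | some b =>
      simp only [Option.map_some]
      by_cases hgt : cnt x > cnt b
      · rw [if_pos hgt, if_pos hgt]; exact ih (some x)
      · rw [if_neg hgt, if_neg hgt]; exact ih (some b)

lemma pvBgFold_none (cnt : Int → Int) (S : List Int) :
    (S.map (fun k => (k, cnt k))).foldl (fun best kc => match best with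
        | none => some kc
        | some b => if kc.2 > b.2 then some kc else some b) none
      = (S.foldl (fun best k => match best with
        | none => some k
        | some b => if cnt k > cnt b then some k else some b) none).map (fun k => (k, cnt k)) := by
  have := pvBgFold cnt S none
  simpa using this

lemma pvGetD_map_fst (o : Option Int) (cnt : Int → Int) :
    ((o.map (fun k => (k, cnt k))).getD (0, 0)).1 = o.getD 0 := by
  cases o <;> rfl

lemma pvBgAlt_eq (grid : List (List Int)) :
    pvBgAlt grid = pvMostCommon (grid.flatMap (fun row => row)) := by
  have hc : (grid.foldl (fun d row => row.foldl (fun d v => d.insert v (d.getD v 0 + 1)) d)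
        (PySem.Dict.empty : PySem.Dict Int Int))
      = PySem.Dict.counter (grid.flatMap fun row => row) := by
    rw [← PySem.Dict.foldl_insert_getD_add_one_eq_counter]
    exact (pvFoldl_flatMap_id grid _ _).symm
  simp only [pvBgAlt, pvMostCommon, hc]
  rw [PySem.Dict.keys_counter, PySem.Dict.items_counter]
  simp only [PySem.Dict.getD_counter]
  rw [pvBgFold_none (fun k => ((List.count k (grid.flatMap fun row => row) : Nat) : Int))]
  exact (pvGetD_map_fst _ _).symm

lemma pvTop2Upd_get? (t : PySem.Dict Int (Option (Int × Int) × (Int × Int))) (k idx v key : Int) :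
    (pvTop2Upd t k idx v).get? key
      = if key = k then some ((t.get? k).map (·.2), (idx, v)) else t.get? key := by
  rw [pvTop2Upd, PySem.Dict.get?_insert]

lemma pvFoldl_top2 {M : Type} (keyf idxf colorf : M → Int) (ms : List M) (key : Int) :
    (ms.foldl (fun t m => pvTop2Upd t (keyf m) (idxf m) (colorf m)) PySem.Dict.empty).get? key
      = pvTop2 ((ms.filter (fun m => keyf m == key)).map (fun m => (idxf m, colorf m))) := by
  induction ms using List.reverseRecOn generalizing key with
  | nil => simp [pvTop2, PySem.Dict.get?_empty]
  | append_singleton ms m ih =>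
    rw [List.foldl_append, List.foldl_cons, List.foldl_nil]
    rw [pvTop2Upd_get?]
    rw [List.filter_append, List.filter_cons, List.filter_nil]
    by_cases hk : key = keyf m
    · rw [if_pos hk]
      have hb : (keyf m == key) = true := by simp [hk]
      rw [hb, if_pos rfl]
      rw [List.map_append, List.map_cons, List.map_nil]
      rw [ih]
      simp only [pvTop2, List.getLast?_concat, List.dropLast_concat, Option.map_some]
      congr 1
      rw [hk]
      cases hL : ((ms.filter (fun m' => keyf m' == keyf m)).map
          (fun m => (idxf m, colorf m))).getLast? <;> simp [pvTop2, hL]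
    · rw [if_neg hk]
      have hb : (keyf m == key) = false := by simp [Ne.symm hk]
      rw [hb, if_neg (by simp)]
      rw [List.append_nil, ih]

lemma pvCand_spec (t : PySem.Dict Int (Option (Int × Int) × (Int × Int))) (key my : Int)
    (L : List (Int × Int)) (hL : L.Pairwise (fun a b => a.1 < b.1))
    (ht : t.get? key = pvTop2 L) :
    pvCand t key my = (L.filter (fun e => e.1 != my)).getLast? := by
  induction L using List.reverseRecOn with
  | nil =>
    simp [pvTop2] at ht
    simp [pvCand, ht]
  | append_singleton L e _ =>
    have ht2 : t.get? key = some (L.getLast?, e) := by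
      rw [ht]; simp [pvTop2, List.getLast?_concat, List.dropLast_concat]
    rw [List.filter_append, List.filter_cons, List.filter_nil]
    simp only [pvCand, ht2]
    by_cases he : e.1 = my
    · rw [if_pos he]
      have hf : (e.1 != my) = false := by simp [he]
      rw [hf]
      have hall : L.filter (fun e => e.1 != my) = L := by
        rw [List.filter_eq_self]
        intro a ha
        have := (List.pairwise_append.mp hL).2.2 a ha e List.mem_cons_self
        simp only [bne_iff_ne, ne_eq]
        omega
      rw [hall]
      simp
    · rw [if_neg he]
      have hf : (e.1 != my) = true := by simp [he]
      rw [hf]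
      simp [List.getLast?_concat]

lemma pvLastFilter_union {M : Type} (f : M → Int) (L : List M)
    (hL : L.Pairwise (fun a b => f a < f b)) (p q : M → Bool) :
    (L.filter (fun m => p m || q m)).getLast?
      = match (L.filter p).getLast?, (L.filter q).getLast? with
        | none, none => none
        | none, some y => some y
        | some x, none => some x
        | some x, some y => if f x > f y then some x else some y := by
  induction L using List.reverseRecOn with
  | nil => simp
  | append_singleton L e ih =>
    have hLp : L.Pairwise (fun a b => f a < f b) := (List.pairwise_append.mp hL).1
    have hlt : ∀ a ∈ L, f a < f e :=
      fun a ha => (List.pairwise_append.mp hL).2.2 a ha e List.mem_cons_self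
    rw [List.filter_append, List.filter_append, List.filter_append,
      List.filter_cons, List.filter_cons, List.filter_cons, List.filter_nil]
    cases hp : p e <;> cases hq : q e
    · simp only [hp, hq, Bool.or_false, Bool.false_eq_true, if_false, List.filter_nil,
        List.append_nil]
      exact ih hLp
    · simp only [hp, hq, Bool.or_true, Bool.false_eq_true, if_false, if_true,
        List.filter_nil, List.append_nil, List.getLast?_concat]
      cases hx : (L.filter p).getLast? with
      | none => rfl
      | some x =>
        have hxe : f x < f e := hlt x (List.mem_of_mem_filter (List.mem_of_getLast? hx))
        simp only [hx]
        rw [if_neg (by omega)]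
    · simp only [hp, hq, Bool.true_or, Bool.false_eq_true, if_false, if_true,
        List.filter_nil, List.append_nil, List.getLast?_concat]
      cases hy : (L.filter q).getLast? with
      | none => rfl
      | some y =>
        have hye : f y < f e := hlt y (List.mem_of_mem_filter (List.mem_of_getLast? hy))
        simp only [hy]
        rw [if_pos (by omega)]
    · simp only [hp, hq, Bool.true_or, if_true, List.filter_nil, List.getLast?_concat]
      rw [if_neg (by omega)]

lemma pvIdx_inj (R C : Nat) (r c : Int) (i j : Nat)
    (hc : 0 ≤ c ∧ c < (C : Int)) (hj : j < C) :
    (r * (C : Int) + c = (i : Int) * (C : Int) + (j : Int)) ↔ (r = (i : Int) ∧ c = (j : Int)) := by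
  constructor
  · intro h
    have h1 : (r - (i : Int)) * C = (j : Int) - c := by linear_combination h
    have h2 : r = (i : Int) := by
      by_contra hne
      rcases lt_or_gt_of_ne hne with hlt | hgt
      · have := mul_le_mul_of_nonneg_right (show r - (i : Int) ≤ -1 by omega)
          (show (0 : Int) ≤ (C : Int) by omega)
        have he : (-1 : Int) * C = -C := by ring
        omega
      · have := mul_le_mul_of_nonneg_right (show (1 : Int) ≤ r - (i : Int) by omega)
          (show (0 : Int) ≤ (C : Int) by omega)
        have he : (1 : Int) * C = C := by ring
        omega
    refine ⟨h2, ?_⟩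
    rw [h2] at h1
    simp at h1
    omega
  · rintro ⟨rfl, rfl⟩; rfl

lemma pvCells_pairwise (R C : Nat) :
    ((List.range R).flatMap (fun r => (List.range C).map (fun c => (r, c)))).Pairwise
      (fun a b : Nat × Nat => a.1 < b.1 ∨ (a.1 = b.1 ∧ a.2 < b.2)) := by
  induction R with
  | zero => simp
  | succ n ih =>
    rw [List.range_succ, List.flatMap_append, List.pairwise_append]
    refine ⟨ih, ?_, ?_⟩
    · simp only [List.flatMap_cons, List.flatMap_nil, List.append_nil]
      rw [List.pairwise_map]
      exact List.pairwise_lt_range.imp (fun h => Or.inr ⟨rfl, h⟩)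
    · intro a ha b hb
      simp only [List.mem_flatMap, List.mem_map, List.mem_range, List.flatMap_cons,
        List.flatMap_nil, List.append_nil] at ha hb
      obtain ⟨r, hr, c, -, rfl⟩ := ha
      obtain ⟨c', -, rfl⟩ := hb
      exact Or.inl hr

lemma pvMarkers_eq_filterMap (grid : List (List Int)) (bg : Int) :
    pvMarkers grid bg
      = ((List.range grid.length).flatMap (fun r =>
          (List.range (grid.getD 0 []).length).map (fun c => (r, c)))).filterMap
        (fun rc : Nat × Nat =>
          let v := (grid.getD rc.1 []).getD rc.2 0
          if v ≠ bg then some ((rc.1 : Int), (rc.2 : Int), v) else none) := by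
  rw [List.filterMap_flatMap]
  unfold pvMarkers
  congr 1
  funext r
  rw [List.filterMap_map]
  rfl

lemma pvMarkers_pairwise (grid : List (List Int)) (bg : Int) :
    (pvMarkers grid bg).Pairwise (fun a b => pvIdx (pvCols grid) a < pvIdx (pvCols grid) b) := by
  rw [pvMarkers_eq_filterMap]
  have hcells := pvCells_pairwise grid.length (pvCols grid)
  have hmem : ∀ x ∈ (List.range grid.length).flatMap (fun r =>
      (List.range (pvCols grid)).map (fun c => (r, c))), x.2 < pvCols grid := by
    intro x hx
    simp only [List.mem_flatMap, List.mem_map, List.mem_range] at hx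
    obtain ⟨r, hr, c, hc, rfl⟩ := hx
    exact hc
  have hcells2 : ((List.range grid.length).flatMap (fun r =>
      (List.range (pvCols grid)).map (fun c => (r, c)))).Pairwise
      (fun a b : Nat × Nat => (a.1 < b.1 ∨ (a.1 = b.1 ∧ a.2 < b.2)) ∧
        a.2 < pvCols grid ∧ b.2 < pvCols grid) :=
    hcells.imp_of_mem (fun ha hb h => ⟨h, hmem _ ha, hmem _ hb⟩)
  apply List.Pairwise.filterMap _ _ hcells2
  intro a a' hS b hb b' hb'
  dsimp only at hb hb'
  by_cases hv : (grid.getD a.1 []).getD a.2 0 ≠ bg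
  · rw [if_pos hv] at hb
    by_cases hv' : (grid.getD a'.1 []).getD a'.2 0 ≠ bg
    · rw [if_pos hv'] at hb'
      obtain rfl := Option.some.inj hb
      obtain rfl := Option.some.inj hb'
      obtain ⟨hlex, ha2, ha2'⟩ := hS
      have hNat : a.1 * pvCols grid + a.2 < a'.1 * pvCols grid + a'.2 := by
        rcases hlex with hlt | ⟨heq, hlt⟩
        · have h1 : (a.1 + 1) * pvCols grid ≤ a'.1 * pvCols grid :=
            Nat.mul_le_mul_right _ (by omega)
          have h2 : (a.1 + 1) * pvCols grid = a.1 * pvCols grid + pvCols grid := by ring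
          omega
        · have h3 : a.1 * pvCols grid = a'.1 * pvCols grid := by rw [heq]
          omega
      simp only [pvIdx]
      push_cast
      exact_mod_cast hNat
    · rw [if_neg hv'] at hb'; cases hb'
  · rw [if_neg hv] at hb; cases hb

lemma pvLastWith_eq_getLast?_filter {α : Type} (p : α → Bool) (l : List α) :
    pvLastWith p l = (l.filter p).getLast? := by
  induction l using List.reverseRecOn with
  | nil => rfl
  | append_singleton l e ih =>
    unfold pvLastWith
    rw [List.foldl_append, List.foldl_cons, List.foldl_nil]
    rw [List.filter_append, List.filter_cons, List.filter_nil]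
    cases he : p e
    · simp only [Bool.false_eq_true, if_false, List.append_nil]
      exact ih
    · simp only [if_true, List.getLast?_concat]

lemma pvTabs_eq (grid : List (List Int)) (bg : Int) :
    (List.range grid.length).foldl (fun st r =>
      (List.range (grid.getD 0 []).length).foldl (fun st c =>
        if (grid.getD r []).getD c 0 ≠ bg then
          (pvTop2Upd st.1 ((r : Int) - (c : Int))
             ((r : Int) * (((grid.getD 0 []).length : Nat) : Int) + (c : Int))
             ((grid.getD r []).getD c 0),
           pvTop2Upd st.2 ((r : Int) + (c : Int))
             ((r : Int) * (((grid.getD 0 []).length : Nat) : Int) + (c : Int))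
             ((grid.getD r []).getD c 0))
        else st) st)
      (PySem.Dict.empty, PySem.Dict.empty)
    = ((pvMarkers grid bg).foldl
        (fun t m => pvTop2Upd t (m.1 - m.2.1) (pvIdx (pvCols grid) m) m.2.2) PySem.Dict.empty,
       (pvMarkers grid bg).foldl
        (fun t m => pvTop2Upd t (m.1 + m.2.1) (pvIdx (pvCols grid) m) m.2.2) PySem.Dict.empty) := by
  rw [← PySem.List.foldl_prod_mk]
  unfold pvMarkers
  rw [pvFoldl_flatMap]
  apply PySem.List.foldl_congr_mem
  intro st r _
  rw [pvFoldl_filterMap]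
  apply PySem.List.foldl_congr_mem
  intro st' c _
  by_cases hv : (grid.getD r []).getD c 0 ≠ bg
  · rw [if_pos hv]
    simp only [if_pos hv, pvIdx, pvCols]
  · rw [if_neg hv]
    simp only [if_neg hv]

lemma transform_alt_get2 (grid : List (List Int)) (i j : Nat)
    (hi : i < grid.length) (hj : j < (grid.getD i []).length) :
    pvGet2 (transform_alt grid) i j
      = if j < pvCols grid
        then pvCell grid (pvMarkers grid (pvMostCommon (grid.flatMap (fun row => row)))) i j
        else pvGet2 grid i j := by
  unfold transform_alt
  dsimp only
  rw [pvBgAlt_eq, pvTabs_eq]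
  rw [pvGet2, List.getD_eq_getElem?_getD (l := List.mapIdx _ grid), List.getElem?_mapIdx,
    List.getElem?_eq_getElem hi, Option.map_some, Option.getD_some,
    List.getD_eq_getElem?_getD, List.getElem?_mapIdx,
    List.getElem?_eq_getElem (by rwa [← List.getD_eq_getElem _ _ hi] : j < grid[i].length),
    Option.map_some, Option.getD_some]
  have hji : j < (grid[i]'hi).length := by
    have h2 := hj
    rwa [List.getD_eq_getElem _ _ hi] at h2
  have hx : grid[i][j] = pvGet2 grid i j := by
    rw [pvGet2, List.getD_eq_getElem _ _ hi, List.getD_eq_getElem _ _ hji]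
  by_cases hjc : j < pvCols grid
  · have hjc' : j < (grid.getD 0 []).length := hjc
    rw [if_pos hjc', if_pos hjc]
    have hpair := pvMarkers_pairwise grid (pvMostCommon (List.flatMap (fun row => row) grid))
    have hd1 := pvFoldl_top2 (fun m : Int × Int × Int => m.1 - m.2.1) (pvIdx (pvCols grid))
      (fun m => m.2.2) (pvMarkers grid (pvMostCommon (List.flatMap (fun row => row) grid)))
      ((i : Int) - (j : Int))
    have hd2 := pvFoldl_top2 (fun m : Int × Int × Int => m.1 + m.2.1) (pvIdx (pvCols grid))
      (fun m => m.2.2) (pvMarkers grid (pvMostCommon (List.flatMap (fun row => row) grid)))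
      ((i : Int) + (j : Int))
    have hLd : (((pvMarkers grid (pvMostCommon (List.flatMap (fun row => row) grid))).filter
        (fun m => m.1 - m.2.1 == (i : Int) - (j : Int))).map
        (fun m => (pvIdx (pvCols grid) m, m.2.2))).Pairwise (fun a b => a.1 < b.1) := by
      rw [List.pairwise_map]
      exact hpair.filter _
    have hLa : (((pvMarkers grid (pvMostCommon (List.flatMap (fun row => row) grid))).filter
        (fun m => m.1 + m.2.1 == (i : Int) + (j : Int))).map
        (fun m => (pvIdx (pvCols grid) m, m.2.2))).Pairwise (fun a b => a.1 < b.1) := by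
      rw [List.pairwise_map]
      exact hpair.filter _
    rw [pvCand_spec _ _ _ _ hLd hd1, pvCand_spec _ _ _ _ hLa hd2]
    rw [List.filter_map, List.getLast?_map, List.filter_map, List.getLast?_map]
    rw [List.filter_filter, List.filter_filter]
    rw [pvCell, pvLastWith_eq_getLast?_filter]
    have hcongr : ∀ m ∈ pvMarkers grid (pvMostCommon (List.flatMap (fun row => row) grid)),
        pvCovers m.1 m.2.1 (i : Int) (j : Int)
          = (((fun e : Int × Int => e.1 != (i : Int) * ((grid.getD 0 []).length : Int) + (j : Int)) ∘
                (fun m => (pvIdx (pvCols grid) m, m.2.2))) m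
              && (m.1 - m.2.1 == (i : Int) - (j : Int))
            || ((fun e : Int × Int => e.1 != (i : Int) * ((grid.getD 0 []).length : Int) + (j : Int)) ∘
                (fun m => (pvIdx (pvCols grid) m, m.2.2))) m
              && (m.1 + m.2.1 == (i : Int) + (j : Int))) := by
      intro m hm
      obtain ⟨r, c, hr, hc, rfl, -⟩ := mem_pvMarkers hm
      have hiff := pvIdx_inj grid.length (pvCols grid) (r : Int) (c : Int) i j
        ⟨by positivity, by exact_mod_cast hc⟩ hjc
      rw [Bool.eq_iff_iff]
      simp only [pvCovers, Function.comp, pvIdx, decide_eq_true_iff, Bool.or_eq_true,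
        Bool.and_eq_true, bne_iff_ne, beq_iff_eq, ne_eq]
      constructor
      · rintro ⟨hd | hd, hne⟩
        · exact Or.inl ⟨fun h => hne (hiff.mp h), by omega⟩
        · exact Or.inr ⟨fun h => hne (hiff.mp h), by omega⟩
      · rintro (⟨hne, hd⟩ | ⟨hne, hd⟩)
        · exact ⟨Or.inl (by omega), fun h => hne (hiff.mpr ⟨h.1, h.2⟩)⟩
        · exact ⟨Or.inr (by omega), fun h => hne (hiff.mpr ⟨h.1, h.2⟩)⟩
    rw [List.filter_congr hcongr]
    rw [pvLastFilter_union (pvIdx (pvCols grid)) _ hpair]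
    rw [hx]
    cases hA : ((pvMarkers grid (pvMostCommon (List.flatMap (fun row => row) grid))).filter
        (fun m => ((fun e : Int × Int => e.1 != (i : Int) * ((grid.getD 0 []).length : Int) + (j : Int)) ∘
            (fun m => (pvIdx (pvCols grid) m, m.2.2))) m
          && (m.1 - m.2.1 == (i : Int) - (j : Int)))).getLast? with
    | none =>
      cases hB : ((pvMarkers grid (pvMostCommon (List.flatMap (fun row => row) grid))).filter
          (fun m => ((fun e : Int × Int => e.1 != (i : Int) * ((grid.getD 0 []).length : Int) + (j : Int)) ∘
              (fun m => (pvIdx (pvCols grid) m, m.2.2))) m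
            && (m.1 + m.2.1 == (i : Int) + (j : Int)))).getLast? with
      | none => simp [hA, hB]
      | some b => simp [hA, hB]
    | some a =>
      cases hB : ((pvMarkers grid (pvMostCommon (List.flatMap (fun row => row) grid))).filter
          (fun m => ((fun e : Int × Int => e.1 != (i : Int) * ((grid.getD 0 []).length : Int) + (j : Int)) ∘
              (fun m => (pvIdx (pvCols grid) m, m.2.2))) m
            && (m.1 + m.2.1 == (i : Int) + (j : Int)))).getLast? with
      | none => simp [hA, hB]
      | some b =>
        simp only [hA, hB, Option.map_some]
        by_cases hcmp : pvIdx (pvCols grid) a > pvIdx (pvCols grid) b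
        · rw [if_pos hcmp, if_pos hcmp]
          simp
        · rw [if_neg hcmp, if_neg hcmp]
          simp
  · have hjc' : ¬ j < (grid.getD 0 []).length := hjc
    rw [if_neg hjc', if_neg hjc, hx]

lemma transform_alt_shape (grid : List (List Int)) : pvShape (transform_alt grid) grid := by
  constructor
  · simp [transform_alt]
  · intro t
    rw [List.getD_eq_getElem?_getD (l := transform_alt grid),
      List.getD_eq_getElem?_getD (l := grid)]
    unfold transform_alt
    rw [List.getElem?_mapIdx]
    cases h : grid[t]? with
    | none => rfl
    | some row => simp [h]

lemma pvEq_of_get2 (a b : List (List Int)) (hl : a.length = b.length)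
    (hrl : ∀ t, (a.getD t []).length = (b.getD t []).length)
    (h : ∀ i j : Nat, i < a.length → j < (a.getD i []).length → pvGet2 a i j = pvGet2 b i j) :
    a = b := by
  apply List.ext_getElem hl
  intro i hi1 hi2
  apply List.ext_getElem
  · have := hrl i
    rwa [List.getD_eq_getElem a [] hi1, List.getD_eq_getElem b [] hi2] at this
  · intro j hj1 hj2
    have hja : j < (a.getD i []).length := by rwa [List.getD_eq_getElem a [] hi1]
    have := h i j hi1 hja
    unfold pvGet2 at this
    rw [List.getD_eq_getElem a [] hi1, List.getD_eq_getElem b [] hi2] at this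
    rwa [List.getD_eq_getElem _ _ hj1, List.getD_eq_getElem _ _ hj2] at this

-- ===== VERDICT (by name: the statement is the Claim_ definition above) =====
theorem transform_spec : Claim_equal_transform := by
  intro grid _ hpre
  unfold Spec_transform
  obtain ⟨hne, hflat, hrl⟩ := hpre
  have hrl' : ∀ row ∈ grid, pvCols grid ≤ row.length := hrl
  have h1 := transform_shape grid
  have h2 := transform_alt_shape grid
  apply pvEq_of_get2
  · exact h1.1.trans h2.1.symm
  · intro t; exact (h1.2 t).trans (h2.2 t).symm
  · intro i j hi hj
    have hi' : i < grid.length := by rwa [h1.1] at hi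
    have hj' : j < (grid.getD i []).length := by
      have := h1.2 i; omega
    rw [transform_get2 grid hrl' i j hi', transform_alt_get2 grid i j hi' hj']
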